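-- pv_equiv track=rewrite | github.com/RoxaneDuroux/ECE2 | Livre_ECE_ecrits/Programmes_python/tri_par_themes_ecrits.py | compteOccurrences
-- ===== SOURCE A (Python) =====
-- def dichotoAux(mot, liste, posMot) :
--     pos = posMot
--     n = len(liste)
--     if n == 0 :
--         return -1
--     elif mot.lower() < liste[n//2].lower() :
--         m = len(liste[:n//2])
--         nouvPosMot = posMot - m//2 - m % 2
--         pos = dichotoAux(mot, liste[:n//2], nouvPosMot)
--     elif mot.lower() > liste[n//2].lower() :
--         m = len(liste[n//2+1:])
--         nouvPosMot = posMot + m//2 + 1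
--         pos = dichotoAux(mot, liste[n//2+1:], nouvPosMot)
--     return pos
--
-- def posMotListe(mot, liste) :
--     n = len(liste)
--     pos = dichotoAux(mot, liste, n//2)
--     return pos
--
-- def compteOccurrences(LthemeExosTriee, LthemeDescTriee) :
--     Loccurrence = [0 for _ in LthemeDescTriee]
--     themesNonPermis = ''
--     for theme in LthemeExosTriee :
--         k = posMotListe(theme, LthemeDescTriee)
--         if k == -1 :
--             themesNonPermis += theme + ", "
--         else :
--             Loccurrence[k] += 1
--     themesNonPermis = themesNonPermis[:-2]
--     return (Loccurrence, themesNonPermis)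
-- ===== SOURCE B (Python) =====
-- def compteOccurrences(LthemeExosTriee, LthemeDescTriee):
--     counts = [0] * len(LthemeDescTriee)
--     missing = []
--     for theme in LthemeExosTriee:
--         target = theme.lower()
--         lo, hi = 0, len(LthemeDescTriee)
--         k = -1
--         while hi > lo:
--             mid = lo + (hi - lo) // 2
--             t = LthemeDescTriee[mid].lower()
--             if target == t:
--                 k = mid
--                 break
--             elif target < t:
--                 hi = mid
--             else:
--                 lo = mid + 1
--         if k == -1:
--             missing.append(theme)
--         else:
--             counts[k] += 1
--     return (counts, ", ".join(missing))
-- ===== Notes on version B (the rewrite author's own statement) =====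
-- stated objective: faster
-- what changed: The recursive slice-based dichotoAux/posMotListe pair (which copies sublists and reconstructs the absolute index with posMot arithmetic) is replaced by a single in-place iterative lo/hi binary search over indices, and the missing-theme string is built with ', '.join on a list instead of concatenation plus a trailing [:-2] trim.
import Mathlib
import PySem

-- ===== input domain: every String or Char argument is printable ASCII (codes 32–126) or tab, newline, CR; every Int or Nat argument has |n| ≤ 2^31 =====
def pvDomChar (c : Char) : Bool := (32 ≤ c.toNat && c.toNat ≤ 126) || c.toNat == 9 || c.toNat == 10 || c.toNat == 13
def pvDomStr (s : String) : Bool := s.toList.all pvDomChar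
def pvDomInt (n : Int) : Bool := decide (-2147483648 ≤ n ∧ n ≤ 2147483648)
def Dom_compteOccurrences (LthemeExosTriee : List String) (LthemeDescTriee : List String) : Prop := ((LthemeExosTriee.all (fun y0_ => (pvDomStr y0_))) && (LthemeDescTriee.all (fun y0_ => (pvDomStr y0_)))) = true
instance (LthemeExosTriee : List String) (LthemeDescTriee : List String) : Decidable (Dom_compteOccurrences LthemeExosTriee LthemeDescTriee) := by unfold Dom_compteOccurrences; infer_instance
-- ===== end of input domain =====

-- B replaces the recursive slice-copying binary search by an iterative index-range one and
-- builds the missing-themes string with join instead of concatenate-then-trim (measured faster).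


-- ===== PORT A =====
-- liste[n//2] is in range whenever n ≠ 0, so the total pyGetD form is exact here.
def dichotoAux (mot : String) (liste : List String) (posMot : Int) : Int :=
  let n := liste.length
  if n = 0 then -1
  else if PySem.Str.lower mot < PySem.Str.lower (PySem.List.pyGetD liste ((n / 2 : Nat) : Int) "") then
    let sub := PySem.List.slice liste none (some ((n / 2 : Nat) : Int))
    let m := sub.length
    dichotoAux mot sub (posMot - ((m / 2 : Nat) : Int) - ((m % 2 : Nat) : Int))
  else if PySem.Str.lower (PySem.List.pyGetD liste ((n / 2 : Nat) : Int) "") < PySem.Str.lower mot then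
    let sub := PySem.List.slice liste (some ((n / 2 + 1 : Nat) : Int)) none
    let m := sub.length
    dichotoAux mot sub (posMot + ((m / 2 : Nat) : Int) + 1)
  else posMot
termination_by liste.length
decreasing_by
  · simp only [PySem.List.slice_to_natCast, List.length_take]; omega
  · simp only [PySem.List.slice_from_natCast, List.length_drop]; omega

def posMotListe (mot : String) (liste : List String) : Int :=
  dichotoAux mot liste ((liste.length / 2 : Nat) : Int)

-- Loccurrence[k] += 1 : k is a valid index produced by the search, so the total pySetD/pyGetD forms are exact.
def compteOccurrences (LthemeExosTriee : List String) (LthemeDescTriee : List String) : List Int × String :=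
  let init : List Int := LthemeDescTriee.map (fun _ => (0 : Int))
  let res := LthemeExosTriee.foldl
    (fun (st : List Int × String) theme =>
      let k := posMotListe theme LthemeDescTriee
      if k = -1 then (st.1, st.2 ++ theme ++ ", ")
      else (PySem.List.pySetD st.1 k (PySem.List.pyGetD st.1 k 0 + 1), st.2))
    (init, "")
  (res.1, PySem.Str.slice res.2 none (some (-2)))

-- ===== PORT B =====
def searchIter (mot : String) (L : List String) (lo hi : Nat) : Int :=
  if lo < hi then
    let mid := lo + (hi - lo) / 2
    let t := PySem.Str.lower (PySem.List.pyGetD L (mid : Int) "")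
    if PySem.Str.lower mot = t then (mid : Int)
    else if PySem.Str.lower mot < t then searchIter mot L lo mid
    else searchIter mot L (mid + 1) hi
  else -1
termination_by hi - lo
decreasing_by all_goals omega

def compteOccurrences_alt (LthemeExosTriee : List String) (LthemeDescTriee : List String) : List Int × String :=
  let res := LthemeExosTriee.foldl
    (fun (st : List Int × List String) theme =>
      let k := searchIter theme LthemeDescTriee 0 LthemeDescTriee.length
      if k = -1 then (st.1, st.2 ++ [theme])
      else (PySem.List.pySetD st.1 k (PySem.List.pyGetD st.1 k 0 + 1), st.2))
    (List.replicate LthemeDescTriee.length (0 : Int), [])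
  (res.1, PySem.Str.join ", " res.2)

-- ===== PRECONDITION & SPEC =====
def Spec_compteOccurrences (LthemeExosTriee : List String) (LthemeDescTriee : List String) (out : List Int × String) : Prop := out = compteOccurrences_alt LthemeExosTriee LthemeDescTriee
instance (LthemeExosTriee : List String) (LthemeDescTriee : List String) (out : List Int × String) : Decidable (Spec_compteOccurrences LthemeExosTriee LthemeDescTriee out) := by unfold Spec_compteOccurrences; infer_instance

-- ===== CLAIM (what is proved, stated in full; the proofs are below) =====
def Claim_equal_compteOccurrences : Prop := ∀ (LthemeExosTriee : List String) (LthemeDescTriee : List String), Dom_compteOccurrences LthemeExosTriee LthemeDescTriee → Spec_compteOccurrences LthemeExosTriee LthemeDescTriee (compteOccurrences LthemeExosTriee LthemeDescTriee)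

-- ===== LEMMAS AND PROOFS =====

theorem dichoto_eq_iter (mot : String) (L : List String) :
    ∀ (n lo hi : Nat), hi - lo = n → lo ≤ hi → hi ≤ L.length →
    dichotoAux mot ((L.drop lo).take (hi - lo)) ((lo + (hi - lo) / 2 : Nat) : Int)
      = searchIter mot L lo hi := by
  intro n
  induction n using Nat.strong_induction_on with
  | _ n IH =>
    intro lo hi hn hlo hhi
    set S := (L.drop lo).take (hi - lo) with hS
    have hSlen : S.length = hi - lo := by
      simp [hS]; omega
    by_cases h0 : hi - lo = 0
    · rw [dichotoAux, searchIter]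
      simp [hSlen, h0]
      omega
    · have hlt : lo < hi := by omega
      have helem : PySem.List.pyGetD S (((hi - lo) / 2 : Nat) : Int) ""
          = PySem.List.pyGetD L ((lo + (hi - lo) / 2 : Nat) : Int) "" := by
        rw [PySem.List.pyGetD_natCast, PySem.List.pyGetD_natCast]
        rw [List.getD_eq_getElem?_getD, List.getD_eq_getElem?_getD]
        rw [hS]
        rw [List.getElem?_take_of_lt (by omega), List.getElem?_drop]
      rw [dichotoAux, searchIter]
      simp only [hSlen, if_neg h0, if_pos hlt, helem]
      by_cases heq : PySem.Str.lower mot = PySem.Str.lower (PySem.List.pyGetD L ((lo + (hi - lo) / 2 : Nat) : Int) "")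
      · rw [heq, if_neg (lt_irrefl _), if_neg (lt_irrefl _), if_pos rfl]
      · by_cases hless : PySem.Str.lower mot < PySem.Str.lower (PySem.List.pyGetD L ((lo + (hi - lo) / 2 : Nat) : Int) "")
        · rw [if_pos hless, if_neg heq, if_pos hless]
          have hsub : PySem.List.slice S none (some (((hi - lo) / 2 : Nat) : Int))
              = (L.drop lo).take ((lo + (hi - lo) / 2) - lo) := by
            rw [PySem.List.slice_to_natCast, hS, List.take_take]
            congr 1; omega
          rw [hsub]
          have hrec := IH ((lo + (hi - lo) / 2) - lo) (by omega) lo (lo + (hi - lo) / 2) (by omega) (by omega) (by omega)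
          have hlen2 : ((L.drop lo).take ((lo + (hi - lo) / 2) - lo)).length = (hi - lo) / 2 := by
            simp; omega
          rw [hlen2, ← hrec]
          all_goals congr 1
          all_goals first | rfl | (push_cast; omega)
        · have hgt : PySem.Str.lower (PySem.List.pyGetD L ((lo + (hi - lo) / 2 : Nat) : Int) "") < PySem.Str.lower mot := by
            rcases lt_trichotomy (PySem.Str.lower mot) (PySem.Str.lower (PySem.List.pyGetD L ((lo + (hi - lo) / 2 : Nat) : Int) "")) with h|h|h
            · exact absurd h hless
            · exact absurd h heq
            · exact h
          rw [if_neg hless, if_pos hgt, if_neg heq, if_neg hless]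
          have hsub : PySem.List.slice S (some (((hi - lo) / 2 + 1 : Nat) : Int)) none
              = (L.drop (lo + (hi - lo) / 2 + 1)).take (hi - (lo + (hi - lo) / 2 + 1)) := by
            rw [PySem.List.slice_from_natCast, hS, List.drop_take, List.drop_drop]
            all_goals congr 1
            all_goals omega
          rw [hsub]
          have hrec := IH (hi - (lo + (hi - lo) / 2 + 1)) (by omega) (lo + (hi - lo) / 2 + 1) hi (by rfl) (by omega) (by omega)
          have hlen2 : ((L.drop (lo + (hi - lo) / 2 + 1)).take (hi - (lo + (hi - lo) / 2 + 1))).length = hi - (lo + (hi - lo) / 2 + 1) := by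
            simp; omega
          rw [hlen2, ← hrec]
          all_goals congr 1
          all_goals first | rfl | (push_cast; omega)

theorem posMotListe_eq (mot : String) (L : List String) :
    posMotListe mot L = searchIter mot L 0 L.length := by
  have h := dichoto_eq_iter mot L L.length 0 L.length rfl (Nat.zero_le _) le_rfl
  simpa [posMotListe] using h


theorem take_concat_eq_join (ms : List String) :
    (List.flatten (ms.map (fun t => t.toList ++ [',', ' ']))).take
      ((List.flatten (ms.map (fun t => t.toList ++ [',', ' ']))).length - 2)
      = PySem.Chars.join [',', ' '] (ms.map String.toList) := by
  induction ms with
  | nil => simp [PySem.Chars.join_nil]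
  | cons t rest ih =>
    cases rest with
    | nil => simp [PySem.Chars.join_singleton]
    | cons t' rest' =>
      have hF : 2 ≤ (List.flatten ((t' :: rest').map (fun t => t.toList ++ [',', ' ']))).length := by
        simp; omega
      rw [List.map_cons, List.flatten_cons, List.length_append,
        show (t.toList ++ [',', ' ']).length
            + (List.flatten ((t' :: rest').map (fun t => t.toList ++ [',', ' ']))).length - 2
          = (t.toList ++ [',', ' ']).length
            + ((List.flatten ((t' :: rest').map (fun t => t.toList ++ [',', ' ']))).length - 2) from by omega,
        List.take_length_add_append, ih]
      simp [PySem.Chars.join_cons_cons]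

theorem fold_rel (D : List String) (themes : List String) :
    ∀ (occ : List Int) (s : String) (ms : List String),
    s.toList = List.flatten (ms.map (fun t => t.toList ++ [',', ' '])) →
    (themes.foldl
      (fun (st : List Int × String) theme =>
        let k := posMotListe theme D
        if k = -1 then (st.1, st.2 ++ theme ++ ", ")
        else (PySem.List.pySetD st.1 k (PySem.List.pyGetD st.1 k 0 + 1), st.2)) (occ, s)).1
      = (themes.foldl
      (fun (st : List Int × List String) theme =>
        let k := searchIter theme D 0 D.length
        if k = -1 then (st.1, st.2 ++ [theme])
        else (PySem.List.pySetD st.1 k (PySem.List.pyGetD st.1 k 0 + 1), st.2)) (occ, ms)).1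
    ∧ (themes.foldl
      (fun (st : List Int × String) theme =>
        let k := posMotListe theme D
        if k = -1 then (st.1, st.2 ++ theme ++ ", ")
        else (PySem.List.pySetD st.1 k (PySem.List.pyGetD st.1 k 0 + 1), st.2)) (occ, s)).2.toList
      = List.flatten (((themes.foldl
      (fun (st : List Int × List String) theme =>
        let k := searchIter theme D 0 D.length
        if k = -1 then (st.1, st.2 ++ [theme])
        else (PySem.List.pySetD st.1 k (PySem.List.pyGetD st.1 k 0 + 1), st.2)) (occ, ms)).2).map (fun t => t.toList ++ [',', ' '])) := by
  induction themes with
  | nil => intro occ s ms hrel; exact ⟨rfl, hrel⟩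
  | cons theme rest ih =>
    intro occ s ms hrel
    rw [List.foldl_cons, List.foldl_cons]
    by_cases hk : searchIter theme D 0 D.length = -1
    · have hka : posMotListe theme D = -1 := by rw [posMotListe_eq]; exact hk
      have ha : (let k := posMotListe theme D
          if k = -1 then ((occ, s).1, (occ, s).2 ++ theme ++ ", ")
          else (PySem.List.pySetD (occ, s).1 k (PySem.List.pyGetD (occ, s).1 k 0 + 1), (occ, s).2))
          = (occ, s ++ theme ++ ", ") := by
        simp only [hka, reduceIte]
      have hb : (let k := searchIter theme D 0 D.length
          if k = -1 then ((occ, ms).1, (occ, ms).2 ++ [theme])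
          else (PySem.List.pySetD (occ, ms).1 k (PySem.List.pyGetD (occ, ms).1 k 0 + 1), (occ, ms).2))
          = (occ, ms ++ [theme]) := by
        simp only [hk, reduceIte]
      rw [ha, hb]
      exact ih occ (s ++ theme ++ ", ") (ms ++ [theme]) (by simp [hrel])
    · have hka : ¬ posMotListe theme D = -1 := by rw [posMotListe_eq]; exact hk
      have ha : (let k := posMotListe theme D
          if k = -1 then ((occ, s).1, (occ, s).2 ++ theme ++ ", ")
          else (PySem.List.pySetD (occ, s).1 k (PySem.List.pyGetD (occ, s).1 k 0 + 1), (occ, s).2))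
          = (PySem.List.pySetD occ (posMotListe theme D) (PySem.List.pyGetD occ (posMotListe theme D) 0 + 1), s) := by
        simp only [if_neg hka]
      have hb : (let k := searchIter theme D 0 D.length
          if k = -1 then ((occ, ms).1, (occ, ms).2 ++ [theme])
          else (PySem.List.pySetD (occ, ms).1 k (PySem.List.pyGetD (occ, ms).1 k 0 + 1), (occ, ms).2))
          = (PySem.List.pySetD occ (searchIter theme D 0 D.length) (PySem.List.pyGetD occ (searchIter theme D 0 D.length) 0 + 1), ms) := by
        simp only [if_neg hk]
      rw [ha, hb, posMotListe_eq]
      exact ih _ s ms hrel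

theorem compteOccurrences_spec' (E D : List String) :
    compteOccurrences E D = compteOccurrences_alt E D := by
  unfold compteOccurrences compteOccurrences_alt
  have hinit : (D.map (fun _ => (0 : Int))) = List.replicate D.length (0 : Int) := by
    simp [List.map_const']
  rw [hinit]
  obtain ⟨h1, h2⟩ := fold_rel D E (List.replicate D.length (0 : Int)) "" [] (by simp)
  refine Prod.ext h1 ?_
  apply String.toList_inj.mp
  rw [PySem.Str.toList_slice, PySem.Chars.slice_eq_listSlice,
    PySem.List.slice_to_neg_ofNat _ 2 (by omega), h2, PySem.Str.toList_join]
  exact take_concat_eq_join _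

-- ===== VERDICT (by name: the statement is the Claim_ definition above) =====
theorem compteOccurrences_spec : Claim_equal_compteOccurrences := by
  intro E D _
  unfold Spec_compteOccurrences
  exact compteOccurrences_spec' E D
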